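-- pv_equiv track=rewrite | github.com/s-perk/leet-code | 45. DP - Jump Game II.py | jumpTab
-- ===== SOURCE A (Python) =====
-- def jumpTab(nums) -> int:
--     table = [0 for _ in range(len(nums) + 1)]
--     table[0] = 1
--
--     for i in range(len(nums)):
--         for j in range(nums[i]):
--             try:
--                 table[i + j] += 1
--             except:
--                 break
--
--     return table[-1]
-- ===== SOURCE B (Python) =====
-- def jumpTab(nums) -> int:
--     n = len(nums)
--     return sum(1 for i, x in enumerate(nums) if i + x > n)
-- ===== Notes on version B (the rewrite author's own statement) =====
-- stated objective: faster
-- what changed: Replaces the DP table and the per-element inner loop over range(nums[i]) by a single enumerate pass counting indices i with i+nums[i] > len(nums) (only position len(nums) of A's table is ever read).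
-- intended difference: On the empty list A returns 1 (the leftover table[0]=1 seed is read back as table[-1]) while B returns the intended count 0, since no index satisfies i+nums[i] > 0. — e.g. on jumpTab([]): A returns 1, B returns 0
import Mathlib
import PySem

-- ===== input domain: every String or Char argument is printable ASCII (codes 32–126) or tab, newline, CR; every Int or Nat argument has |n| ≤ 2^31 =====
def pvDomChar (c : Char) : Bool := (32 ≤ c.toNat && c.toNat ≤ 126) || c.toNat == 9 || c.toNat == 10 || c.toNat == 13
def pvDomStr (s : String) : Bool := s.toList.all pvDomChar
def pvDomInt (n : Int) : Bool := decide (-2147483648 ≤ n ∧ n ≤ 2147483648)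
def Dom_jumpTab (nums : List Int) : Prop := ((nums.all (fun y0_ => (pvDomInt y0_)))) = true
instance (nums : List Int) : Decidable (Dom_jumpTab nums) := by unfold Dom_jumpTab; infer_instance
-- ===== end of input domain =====

-- B replaces A's DP table and inner loop over range(nums[i]) by one enumerate pass counting
-- the indices i with i + nums[i] > len(nums); on [] A returns 1 (leftover seed), B returns 0.

-- ===== PORT A =====
-- inner loop: for j in range(cnt): try: table[i+j] += 1 except: break
-- (the bare except only ever catches the IndexError when i+j runs past the table;
-- ported as the explicit bounds check that ends the loop — exact)
def jumpTabInner (tbl : List Int) (i j : Nat) (cnt : Int) : List Int :=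
  if (j : Int) < cnt then
    if h : i + j < tbl.length then
      jumpTabInner (tbl.set (i + j) (tbl[i + j]! + 1)) i (j + 1) cnt
    else tbl
  else tbl
termination_by tbl.length + 1 - (i + j)
decreasing_by simp only [List.length_set]; omega

def jumpTab (nums : List Int) : Int :=
  let table := (List.replicate (nums.length + 1) (0 : Int)).set 0 1
  let final := (List.range nums.length).foldl (fun tbl i => jumpTabInner tbl i 0 (nums[i]!)) table
  PySem.List.pyGetD final (-1) 0   -- table[-1]; final is nonempty so this never raises

-- ===== PORT B =====
def jumpTab_alt (nums : List Int) : Int :=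
  let n : Int := (nums.length : Int)
  (PySem.List.enumerate nums).foldl (fun acc p => acc + (if p.1 + p.2 > n then 1 else 0)) 0

-- ===== PRECONDITION & SPEC =====
-- On the empty list A returns 1 (the leftover table[0]=1 seed is read back as table[-1]);
-- B returns the intended count 0, since no index satisfies i+nums[i] > 0.
def D_jumpTab (nums : List Int) : Prop := nums = []
instance (nums : List Int) : Decidable (D_jumpTab nums) := by unfold D_jumpTab; infer_instance
def Spec_jumpTab (nums : List Int) (out : Int) : Prop := ¬ D_jumpTab nums → out = jumpTab_alt nums
instance (nums : List Int) (out : Int) : Decidable (Spec_jumpTab nums out) := by unfold Spec_jumpTab; infer_instance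
def pvDiffWitness_jumpTab : List Int := []
def pvDiffWitnessOut_jumpTab : Int × Int := (1, 0)

-- ===== CLAIM (what is proved, stated in full; the proofs are below) =====
def Claim_unchanged_jumpTab : Prop := ∀ (nums : List Int), Dom_jumpTab nums → Spec_jumpTab nums (jumpTab nums)
def Claim_changed_jumpTab : Prop := Dom_jumpTab (pvDiffWitness_jumpTab) ∧ D_jumpTab (pvDiffWitness_jumpTab) ∧ jumpTab (pvDiffWitness_jumpTab) = pvDiffWitnessOut_jumpTab.1 ∧ jumpTab_alt (pvDiffWitness_jumpTab) = pvDiffWitnessOut_jumpTab.2 ∧ pvDiffWitnessOut_jumpTab.1 ≠ pvDiffWitnessOut_jumpTab.2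
def Claim_exact_jumpTab : Prop := ∀ (nums : List Int), Dom_jumpTab nums → D_jumpTab nums → jumpTab nums ≠ jumpTab_alt nums

-- ===== LEMMAS AND PROOFS =====

-- the common count both programs compute on non-empty input
def jtCount (nums : List Int) : Int :=
  ((List.range nums.length).map
    (fun (i : Nat) => if (i : Int) + nums[i]! > (nums.length : Int) then (1 : Int) else 0)).sum

theorem jumpTabInner_length (tbl : List Int) (i j : Nat) (cnt : Int) :
    (jumpTabInner tbl i j cnt).length = tbl.length := by
  fun_induction jumpTabInner with
  | case1 tbl j h1 h2 ih => simpa using ih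
  | case2 => rfl
  | case3 => rfl

-- only cell n of the table matters: the inner loop adds 1 to it iff it reaches j = n - i
theorem jumpTabInner_getD (n : Nat) (tbl : List Int) (i j : Nat) (cnt : Int) :
    tbl.length = n + 1 →
    (jumpTabInner tbl i j cnt).getD n 0 =
      tbl.getD n 0 + (if ((j : Int) ≤ (n : Int) - (i : Int) ∧ (n : Int) - (i : Int) < cnt) then 1 else 0) := by
  fun_induction jumpTabInner with
  | case1 tbl j h1 h2 ih =>
    intro hl
    rw [ih (by simpa using hl)]
    rcases Nat.lt_or_ge (i + j) n with hlt | hge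
    · rw [List.getD_eq_getElem?_getD, List.getElem?_set_ne (by omega), ← List.getD_eq_getElem?_getD]
      have c1 : (((j:Int) + 1 ≤ (n : Int) - i) ↔ ((j:Int) ≤ (n:Int) - i)) := by
        constructor <;> intro h <;> omega
      push_cast
      rw [if_congr (and_congr_left' c1) rfl rfl]
    · have he : i + j = n := by omega
      rw [List.getD_eq_getElem?_getD, he, List.getElem?_set_self (by omega), Option.getD_some]
      have h2' : ¬ ((j:Int) + 1 ≤ (n:Int) - i) := by omega
      rw [if_neg (fun hc => h2' (by push_cast at hc ⊢; omega)),
        if_pos ⟨by omega, by omega⟩]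
      have hbg : tbl[n]! = tbl.getD n 0 := by
        rw [List.getElem!_eq_getElem?_getD, List.getD_eq_getElem?_getD]; rfl
      rw [hbg]; ring
  | case2 tbl j h1 h2 =>
    intro hl
    have hh : ¬ ((j:Int) ≤ (n:Int) - i) := by omega
    simp [hh]
  | case3 tbl j h1 =>
    intro hl
    have hh : ¬ ((j:Int) ≤ (n:Int) - i ∧ (n:Int) - (i:Int) < cnt) := by
      rintro ⟨ha, hb⟩; omega
    simp [hh]

-- outer-loop invariant for A
theorem jumpTab_fold (nums : List Int) (k : Nat) (hk : k ≤ nums.length) :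
    ((List.range k).foldl (fun tbl i => jumpTabInner tbl i 0 (nums[i]!))
        ((List.replicate (nums.length + 1) (0 : Int)).set 0 1)).length = nums.length + 1 ∧
    ((List.range k).foldl (fun tbl i => jumpTabInner tbl i 0 (nums[i]!))
        ((List.replicate (nums.length + 1) (0 : Int)).set 0 1)).getD nums.length 0 =
      (if nums.length = 0 then 1 else 0) +
      ((List.range k).map
        (fun (i : Nat) => if (i : Int) + nums[i]! > (nums.length : Int) then (1 : Int) else 0)).sum := by
  induction k with
  | zero =>
    simp only [List.range_zero, List.foldl_nil, List.map_nil, List.sum_nil, add_zero]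
    refine ⟨by simp, ?_⟩
    rcases Nat.eq_zero_or_pos nums.length with h0 | h0
    · simp [h0]
    · rw [List.getD_eq_getElem?_getD, List.getElem?_set_ne (by omega),
        List.getElem?_replicate_of_lt (by omega)]
      simp [Nat.pos_iff_ne_zero.mp h0]
  | succ k ih =>
    obtain ⟨ihl, ihv⟩ := ih (by omega)
    rw [List.range_succ, List.foldl_append, List.map_append, List.sum_append]
    refine ⟨by rw [List.foldl_cons, List.foldl_nil, jumpTabInner_length]; exact ihl, ?_⟩
    rw [List.foldl_cons, List.foldl_nil,
      jumpTabInner_getD nums.length _ k 0 (nums[k]!) ihl, ihv]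
    have hcond : (((0:Nat) : Int) ≤ (nums.length : Int) - (k : Int) ∧
        (nums.length : Int) - (k : Int) < nums[k]!) ↔
        ((k : Int) + nums[k]! > (nums.length : Int)) := by
      constructor
      · rintro ⟨_, hb⟩; omega
      · intro h; exact ⟨by omega, by omega⟩
    rw [if_congr hcond rfl rfl]
    simp; ring

theorem jumpTab_eq_count (nums : List Int) (h : nums ≠ []) :
    jumpTab nums = jtCount nums := by
  obtain ⟨hl, hv⟩ := jumpTab_fold nums nums.length (le_refl _)
  show PySem.List.pyGetD ((List.range nums.length).foldl
      (fun tbl i => jumpTabInner tbl i 0 (nums[i]!))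
      ((List.replicate (nums.length + 1) (0 : Int)).set 0 1)) (-1) 0 = jtCount nums
  set T := (List.range nums.length).foldl (fun tbl i => jumpTabInner tbl i 0 (nums[i]!))
      ((List.replicate (nums.length + 1) (0 : Int)).set 0 1) with hT
  have hne : T ≠ [] := by intro hc; rw [hc] at hl; simp at hl
  have hn0 : nums.length ≠ 0 := by simpa using h
  rw [PySem.List.pyGetD_neg_one _ _ hne, List.getLast_eq_getElem]
  have hidx : T.length - 1 = nums.length := by omega
  have hval : T[T.length - 1]'(by omega) = T.getD nums.length 0 := by
    rw [List.getD_eq_getElem?_getD, List.getElem?_eq_getElem (by omega), Option.getD_some]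
    exact getElem_congr_idx hidx
  rw [hval, hv, if_neg hn0, jtCount]; ring

theorem jumpTab_alt_eq_count (nums : List Int) :
    jumpTab_alt nums = jtCount nums := by
  unfold jumpTab_alt jtCount
  rw [PySem.List.foldl_add]
  have : (PySem.List.enumerate nums).map
      (fun p => if p.1 + p.2 > (nums.length : Int) then (1:Int) else 0) =
      (List.range nums.length).map
      (fun (i : Nat) => if (i : Int) + nums[i]! > (nums.length : Int) then (1 : Int) else 0) := by
    apply List.ext_getElem
    · simp [PySem.List.length_enumerate]
    · intro k h1 h2
      simp only [List.getElem_map, PySem.List.getElem_enumerate, List.getElem_range]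
      have hk : k < nums.length := by simpa [PySem.List.length_enumerate] using h1
      rw [getElem!_pos nums k hk]
      norm_num
  rw [this]; ring

-- ===== VERDICT (by name: the statement is the Claim_ definition above) =====
theorem jumpTab_spec : Claim_unchanged_jumpTab := by
  intro nums _ hd
  have h : nums ≠ [] := fun hc => hd hc
  rw [jumpTab_eq_count nums h, jumpTab_alt_eq_count]

theorem jumpTab_changed : Claim_changed_jumpTab := by unfold Claim_changed_jumpTab; decide

theorem jumpTab_tight : Claim_exact_jumpTab := by
  intro nums _ hd
  unfold D_jumpTab at hd; subst hd; decide
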